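-- pv_equiv track=rewrite | github.com/Cosmin-Pavel/Chess-Licenta- | Game Loop final - capitolul 7/camera.py | construct_fen
-- ===== SOURCE A (Python) =====
-- def construct_fen(chessboard_matrix):
--     piece_map = {
--         "WP": "P", "WR": "R", "WN": "N", "WB": "B", "WQ": "Q", "WK": "K",
--         "BP": "p", "BR": "r", "BN": "n", "BB": "b", "BQ": "q", "BK": "k",
--         "Background": "0"
--     }
--
--     fen_rows = []
--     for row in chessboard_matrix:
--         fen_row = ""
--         empty_count = 0
--         for cell in row:
--             if cell == "Background":
--                 empty_count += 1
--             else: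
--                 if empty_count > 0:
--                     fen_row += str(empty_count)
--                     empty_count = 0
--                 fen_row += piece_map.get(cell, cell)
--         if empty_count > 0:
--             fen_row += str(empty_count)
--         fen_rows.append(fen_row)
--
--     fen = "/".join(fen_rows)
--     return fen
-- ===== SOURCE B (Python) =====
-- def construct_fen(chessboard_matrix):
--     piece_map = {
--         "WP": "P", "WR": "R", "WN": "N", "WB": "B", "WQ": "Q", "WK": "K",
--         "BP": "p", "BR": "r", "BN": "n", "BB": "b", "BQ": "q", "BK": "k",
--         "Background": "0"
--     }
--
--     def encode(row):
--         # translate first, then collapse consecutive runs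
--         tagged = [(cell == "Background", piece_map.get(cell, cell)) for cell in row]
--         parts = []
--         i = 0
--         n = len(tagged)
--         while i < n:
--             j = i + 1
--             while j < n and tagged[j][0] == tagged[i][0]:
--                 j += 1
--             if tagged[i][0]:
--                 parts.append(str(j - i))
--             else:
--                 parts.append("".join(m for _, m in tagged[i:j]))
--             i = j
--         return "".join(parts)
--
--     return "/".join(encode(row) for row in chessboard_matrix)
-- ===== Notes on version B (the rewrite author's own statement) =====
-- stated objective: alternative
-- what changed: Replaces A's per-cell empty_count accumulator with flush logic by a translate-then-group pipeline: each row is first mapped to (is_background, mapped_char) tags, then consecutive runs are collapsed (a background run becomes its length, a piece run the concatenation of its mapped characters).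
import Mathlib
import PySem

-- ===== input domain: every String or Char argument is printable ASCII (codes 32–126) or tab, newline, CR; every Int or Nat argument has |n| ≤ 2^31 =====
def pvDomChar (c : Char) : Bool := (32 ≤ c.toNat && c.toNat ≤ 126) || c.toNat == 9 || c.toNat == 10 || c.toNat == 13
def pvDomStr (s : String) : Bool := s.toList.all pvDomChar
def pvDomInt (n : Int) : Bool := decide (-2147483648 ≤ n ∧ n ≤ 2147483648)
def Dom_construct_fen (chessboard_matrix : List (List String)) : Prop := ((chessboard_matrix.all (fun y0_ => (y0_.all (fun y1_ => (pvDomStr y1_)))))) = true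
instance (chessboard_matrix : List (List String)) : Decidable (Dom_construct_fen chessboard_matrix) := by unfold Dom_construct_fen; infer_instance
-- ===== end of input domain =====

-- B replaces A's empty-count accumulator/flush by a translate-then-group-runs pipeline (alternative decomposition, same cost).

-- the piece_map literal both Pythons define
def pvPieceMap : PySem.Dict String String := PySem.Dict.ofList
  [("WP", "P"), ("WR", "R"), ("WN", "N"), ("WB", "B"), ("WQ", "Q"), ("WK", "K"),
   ("BP", "p"), ("BR", "r"), ("BN", "n"), ("BB", "b"), ("BQ", "q"), ("BK", "k"),
   ("Background", "0")]

-- ===== PORT A =====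
-- A's inner loop body: state (fen_row, empty_count)
def pvStepA (st : String × Int) (cell : String) : String × Int :=
  if cell == "Background" then (st.1, st.2 + 1)
  else ((if st.2 > 0 then st.1 ++ PySem.Int.toStr st.2 else st.1) ++ PySem.Dict.getD pvPieceMap cell cell, 0)

def pvRowA (row : List String) : String :=
  let st := row.foldl pvStepA ("", 0)
  if st.2 > 0 then st.1 ++ PySem.Int.toStr st.2 else st.1

def construct_fen (chessboard_matrix : List (List String)) : String :=
  PySem.Str.join "/" (chessboard_matrix.foldl (fun rows row => rows ++ [pvRowA row]) [])

-- ===== PORT B =====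
-- Source B's tagging: (cell == "Background", piece_map.get(cell, cell))
def pvMapCell (cell : String) : Bool × String := (cell == "Background", PySem.Dict.getD pvPieceMap cell cell)

-- Source B's run-grouping scan (the i/j while loops): peel one maximal run at a time
def pvRuns : List (Bool × String) → List String
  | [] => []
  | (b, s) :: rest =>
    (if b then PySem.Int.toStr (1 + ((rest.takeWhile (fun p => p.1 == b)).length : Int))
     else PySem.Str.join "" (s :: (rest.takeWhile (fun p => p.1 == b)).map Prod.snd))
      :: pvRuns (rest.dropWhile (fun p => p.1 == b))
termination_by l => l.length
decreasing_by simpa using Nat.lt_succ_of_le (List.length_dropWhile_le _ _)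

def pvRowB (row : List String) : String :=
  PySem.Str.join "" (pvRuns (row.map pvMapCell))

def construct_fen_alt (chessboard_matrix : List (List String)) : String :=
  PySem.Str.join "/" (chessboard_matrix.map pvRowB)

-- ===== PRECONDITION & SPEC =====
def Spec_construct_fen (chessboard_matrix : List (List String)) (out : String) : Prop := out = construct_fen_alt chessboard_matrix
instance (chessboard_matrix : List (List String)) (out : String) : Decidable (Spec_construct_fen chessboard_matrix out) := by unfold Spec_construct_fen; infer_instance

-- ===== CLAIM (what is proved, stated in full; the proofs are below) =====
def Claim_equal_construct_fen : Prop := ∀ (chessboard_matrix : List (List String)), Dom_construct_fen chessboard_matrix → Spec_construct_fen chessboard_matrix (construct_fen chessboard_matrix)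

-- ===== LEMMAS AND PROOFS =====

theorem pv_join_empty_cons (x : String) (xs : List String) :
    PySem.Str.join "" (x :: xs) = x ++ PySem.Str.join "" xs := by
  have h : ∀ (a : List Char) (rest : List (List Char)),
      PySem.Chars.join [] (a :: rest) = a ++ PySem.Chars.join [] rest := by
    intro a rest
    cases rest with
    | nil => simp [PySem.Chars.join_singleton, PySem.Chars.join_nil]
    | cons b r => simp [PySem.Chars.join_cons_cons]
  simp [PySem.Str.join, h]

-- A's pending-count flush
def pvFlush (ec : Int) : String := if ec > 0 then PySem.Int.toStr ec else ""

-- canonical recursive description of one encoded row, with pending empty count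
def pvG : Int → List String → String
  | ec, [] => pvFlush ec
  | ec, c :: cs =>
    if c == "Background" then pvG (ec + 1) cs
    else pvFlush ec ++ (PySem.Dict.getD pvPieceMap c c ++ pvG 0 cs)

theorem pv_lemA (row : List String) : ∀ (fr : String) (ec : Int),
    (let st := row.foldl pvStepA (fr, ec);
     if st.2 > 0 then st.1 ++ PySem.Int.toStr st.2 else st.1) = fr ++ pvG ec row := by
  induction row with
  | nil =>
    intro fr ec
    simp only [List.foldl_nil, pvG, pvFlush]
    split_ifs <;> simp [String.append_empty]
  | cons c cs ih =>
    intro fr ec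
    by_cases hc : c == "Background"
    · simp only [List.foldl_cons, pvStepA, hc, if_pos, pvG]
      exact ih fr (ec + 1)
    · simp only [List.foldl_cons, pvStepA, hc, if_neg, Bool.false_eq_true, not_false_iff, pvG,
        pvFlush]
      rw [ih]
      split_ifs <;> simp [String.append_assoc, String.empty_append]

theorem pv_rowA_eq (row : List String) : pvRowA row = pvG 0 row := by
  have := pv_lemA row "" 0
  simpa [pvRowA, String.empty_append] using this

theorem pv_bg_prefix (bgs : List String) : ∀ (rest : List String) (n : Int),
    (∀ c ∈ bgs, c = "Background") → pvG n (bgs ++ rest) = pvG (n + bgs.length) rest := by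
  induction bgs with
  | nil => intro rest n _; simp
  | cons c cs ih =>
    intro rest n h
    have hc : c = "Background" := h c (by simp)
    simp only [List.cons_append, pvG, hc, beq_self_eq_true, if_pos]
    rw [ih rest (n + 1) (fun d hd => h d (by simp [hd]))]
    congr 1
    simp only [List.length_cons]
    push_cast
    omega

theorem pv_nb_prefix (ps : List String) : ∀ (rest : List String),
    (∀ c ∈ ps, ¬ c = "Background") →
    pvG 0 (ps ++ rest) = PySem.Str.join "" (ps.map (fun c => PySem.Dict.getD pvPieceMap c c)) ++ pvG 0 rest := by
  induction ps with
  | nil => intro rest _; simp [PySem.Str.join, PySem.Chars.join_nil, String.empty_append]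
  | cons c cs ih =>
    intro rest h
    have hc : ¬ c = "Background" := h c (by simp)
    simp only [List.cons_append, pvG, pvFlush, beq_iff_eq, hc, if_false]
    rw [ih rest (fun d hd => h d (by simp [hd])), List.map_cons, pv_join_empty_cons]
    simp [String.append_assoc, String.empty_append]

theorem pv_flush_head (rest : List String) (n : Int) (hn : 0 < n)
    (hhead : rest = [] ∨ ∃ d ds, rest = d :: ds ∧ ¬ d = "Background") :
    pvG n rest = PySem.Int.toStr n ++ pvG 0 rest := by
  rcases hhead with h | ⟨d, ds, rfl, hd⟩
  · subst h; simp [pvG, pvFlush, hn, String.append_empty]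
  · simp [pvG, pvFlush, hn, hd, String.empty_append]

-- the head of dropWhile fails the predicate
theorem pv_dropWhile_head {α : Type} (p : α → Bool) (l : List α) (d : α) (ds : List α)
    (h : l.dropWhile p = d :: ds) : p d = false := by
  induction l with
  | nil => simp at h
  | cons x xs ih =>
    by_cases hx : p x
    · rw [List.dropWhile_cons_of_pos hx] at h; exact ih h
    · rw [List.dropWhile_cons_of_neg hx] at h
      cases h; simpa using hx

theorem pv_lemB (N : Nat) : ∀ (row : List String), row.length ≤ N →
    PySem.Str.join "" (pvRuns (row.map pvMapCell)) = pvG 0 row := by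
  induction N with
  | zero =>
    intro row h
    have : row = [] := List.eq_nil_of_length_eq_zero (Nat.le_zero.mp h)
    subst this
    simp [pvRuns, PySem.Str.join, PySem.Chars.join_nil, pvG, pvFlush]
  | succ N ih =>
    intro row hlen
    cases row with
    | nil => simp [pvRuns, PySem.Str.join, PySem.Chars.join_nil, pvG, pvFlush]
    | cons c cs =>
      have hcslen : cs.length ≤ N := by simpa using Nat.lt_succ_iff.mp (by simpa using hlen)
      simp only [List.map_cons, pvMapCell, pvRuns]
      rw [List.takeWhile_map, List.dropWhile_map]
      by_cases hc : (c == "Background") = true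
      · -- background run
        rw [hc]
        have hpred : ((fun (p : Bool × String) => p.1 == true) ∘ pvMapCell) =
            (fun cell => cell == "Background") := by
          funext cell; simp [pvMapCell]
        rw [hpred, if_pos rfl]
        have hsplit : cs.takeWhile (fun cell => cell == "Background") ++
            cs.dropWhile (fun cell => cell == "Background") = cs :=
          List.takeWhile_append_dropWhile
        have hrestlen : (cs.dropWhile (fun cell => cell == "Background")).length ≤ N := by
          have h1 := List.length_dropWhile_le (fun cell => cell == "Background") cs
          omega
        rw [pv_join_empty_cons, ih _ hrestlen]
        have hcs : pvG 0 (c :: cs) = pvG 1 cs := by simp [pvG, hc]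
        have hG : pvG 1 cs =
            PySem.Int.toStr (1 + ((cs.takeWhile (fun cell => cell == "Background")).length : Int)) ++
              pvG 0 (cs.dropWhile (fun cell => cell == "Background")) := by
          conv_lhs => rw [← hsplit]
          rw [pv_bg_prefix _ _ 1 ?allbg]
          case allbg =>
            intro d hd
            have := List.mem_takeWhile_imp hd
            simpa using this
          rw [pv_flush_head _ (1 + (cs.takeWhile (fun cell => cell == "Background")).length)
              (by positivity) ?hd]
          case hd =>
            cases hr : cs.dropWhile (fun cell => cell == "Background") with
            | nil => exact Or.inl rfl
            | cons d ds =>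
              right
              refine ⟨d, ds, rfl, ?_⟩
              have := pv_dropWhile_head _ cs d ds hr
              simpa using this
        rw [hcs, hG]
        congr 3
        simp
      · -- piece run
        rw [show (c == "Background") = false by simpa using hc]
        have hpred : ((fun (p : Bool × String) => p.1 == false) ∘ pvMapCell) =
            (fun cell => !(cell == "Background")) := by
          funext cell; simp [pvMapCell]
        rw [hpred, if_neg (by simp)]
        have hsplit : cs.takeWhile (fun cell => !(cell == "Background")) ++
            cs.dropWhile (fun cell => !(cell == "Background")) = cs :=
          List.takeWhile_append_dropWhile
        have hrestlen : (cs.dropWhile (fun cell => !(cell == "Background"))).length ≤ N := by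
          have h1 := List.length_dropWhile_le (fun cell => !(cell == "Background")) cs
          omega
        rw [pv_join_empty_cons, ih _ hrestlen]
        have hmap : ((cs.takeWhile (fun cell => !(cell == "Background"))).map pvMapCell).map Prod.snd =
            (cs.takeWhile (fun cell => !(cell == "Background"))).map
              (fun cell => PySem.Dict.getD pvPieceMap cell cell) := by
          simp [pvMapCell, Function.comp]
        rw [hmap]
        have hrhs : pvG 0 (c :: cs) =
            "" ++ (PySem.Dict.getD pvPieceMap c c ++ pvG 0 cs) := by
          simp [pvG, hc, pvFlush]
        have hG : pvG 0 cs =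
            PySem.Str.join "" ((cs.takeWhile (fun cell => !(cell == "Background"))).map
              (fun cell => PySem.Dict.getD pvPieceMap cell cell)) ++
              pvG 0 (cs.dropWhile (fun cell => !(cell == "Background"))) := by
          conv_lhs => rw [← hsplit]
          exact pv_nb_prefix _ _ (by
            intro d hd
            have := List.mem_takeWhile_imp hd
            simpa using this)
        rw [hrhs, hG, pv_join_empty_cons]
        simp [String.append_assoc, String.empty_append]

theorem pv_row_eq (row : List String) : pvRowA row = pvRowB row := by
  rw [pv_rowA_eq, pvRowB, pv_lemB row.length row (Nat.le_refl _)]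

-- ===== VERDICT (by name: the statement is the Claim_ definition above) =====
theorem construct_fen_spec : Claim_equal_construct_fen := by
  intro m _
  unfold Spec_construct_fen construct_fen construct_fen_alt
  rw [PySem.List.foldl_append_singleton_eq_map]
  congr 1
  exact List.map_congr_left (fun row _ => pv_row_eq row)
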